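-- pv_equiv track=rewrite | github.com/abhishek1d4/dials-slackbot | script_for_bot.py | find_link
-- ===== SOURCE A (Python) =====
-- def find_link(ticket_data,base_url):
--     if not ticket_data:
--         return None
--
--     fields = ticket_data.get("fields", {})
--     description = fields.get("description", "")
--
--
--     if base_url in description:
--         start_index = description.find(base_url)
--         next_space = description.find(" ", start_index)
--         next_https = description.find("https://", start_index + len(base_url))
--         next_http = description.find("http://", start_index + len(base_url))
--         # Determine the end of the link via next https or space or end of description ends the link
--         possible_ends = [next_space, next_https,next_http, len(description),]
--         end_index = min([index for index in possible_ends if index != -1])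
--         return description[start_index:end_index]
--
--     return None
-- ===== SOURCE B (Python) =====
-- def find_link(ticket_data, base_url):
--     if not ticket_data:
--         return None
--     description = ticket_data.get("fields", {}).get("description", "")
--     start = description.find(base_url)
--     if start == -1:
--         return None
--     limit = start + len(base_url)
--     n = len(description)
--     i = start
--     while i < n:
--         if description[i] == " ":
--             break
--         if i >= limit and (description.startswith("https://", i) or description.startswith("http://", i)):
--             break
--         i += 1
--     return description[start:i]
-- ===== Notes on version B (the rewrite author's own statement) =====
-- stated objective: alternative
-- what changed: A locates the link end by four independent find calls (space, https, http, end-of-string) and takes the min of those that hit; B makes one forward scan from the start of the match, stopping at the first space or at the first http(s):// occurrence at or past the end of base_url.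
import Mathlib
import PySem

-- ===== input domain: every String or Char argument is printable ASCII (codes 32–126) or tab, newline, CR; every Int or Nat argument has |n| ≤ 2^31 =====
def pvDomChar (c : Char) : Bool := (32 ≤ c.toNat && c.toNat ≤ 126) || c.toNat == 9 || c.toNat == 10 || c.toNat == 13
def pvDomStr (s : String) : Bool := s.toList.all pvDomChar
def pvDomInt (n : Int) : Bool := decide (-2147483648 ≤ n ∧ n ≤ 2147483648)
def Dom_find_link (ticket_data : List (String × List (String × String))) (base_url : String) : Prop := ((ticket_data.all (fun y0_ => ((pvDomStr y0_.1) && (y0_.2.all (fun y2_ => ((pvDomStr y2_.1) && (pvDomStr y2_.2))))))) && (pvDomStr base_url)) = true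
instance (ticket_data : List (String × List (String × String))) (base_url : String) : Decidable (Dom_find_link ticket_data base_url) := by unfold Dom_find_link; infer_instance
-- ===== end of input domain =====

-- B replaces A's four independent find calls plus min by a single forward scan from the
-- start of the link (objective: alternative decomposition, same asymptotic cost).

-- ===== PORT A =====
def find_link (ticket_data : List (String × List (String × String))) (base_url : String) : Option String :=
  if ticket_data = [] then none
  else
    let fields := (PySem.Dict.mk ticket_data).getD "fields" []
    let description := (PySem.Dict.mk fields).getD "description" ""
    if PySem.Str.isIn base_url description then
      let start_index := PySem.Str.find description base_url
      let next_space := PySem.Str.findFrom description " " start_index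
      let next_https := PySem.Str.findFrom description "https://" (start_index + PySem.Str.len base_url)
      let next_http := PySem.Str.findFrom description "http://" (start_index + PySem.Str.len base_url)
      let possible_ends := [next_space, next_https, next_http, PySem.Str.len description]
      match PySem.List.min? (possible_ends.filter (fun i => i ≠ -1)) (fun x => x) with
      | some end_index => some (PySem.Str.slice description (some start_index) (some end_index))
      | none => none  -- unreachable: len(description) is in the filtered list
    else none

-- ===== PORT B =====
-- the while loop of Source B: scan i forward until a space, an http(s) link start at or past
-- `limit`, or the end of the string (description.startswith(p, i) is exact as
-- startswith on (s.drop i) for 0 ≤ i)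
def scanEnd (s : List Char) (limit : Nat) (i : Nat) : Nat :=
  if h : i < s.length then
    if s[i] = ' ' then i
    else if limit ≤ i ∧ (PySem.Chars.startswith (s.drop i) "https://".toList
                          || PySem.Chars.startswith (s.drop i) "http://".toList) then i
    else scanEnd s limit (i + 1)
  else i
termination_by s.length - i

def find_link_alt (ticket_data : List (String × List (String × String))) (base_url : String) : Option String :=
  if ticket_data = [] then none
  else
    let description := (PySem.Dict.mk ((PySem.Dict.mk ticket_data).getD "fields" [])).getD "description" ""
    let start := PySem.Str.find description base_url
    if start = -1 then none
    else
      let st := start.toNat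
      let limit := st + base_url.toList.length
      let i := scanEnd description.toList limit st
      some (PySem.Str.slice description (some (st : Int)) (some (i : Int)))

-- ===== PRECONDITION & SPEC =====
def Spec_find_link (ticket_data : List (String × List (String × String))) (base_url : String) (out : Option String) : Prop := out = find_link_alt ticket_data base_url
instance (ticket_data : List (String × List (String × String))) (base_url : String) (out : Option String) : Decidable (Spec_find_link ticket_data base_url out) := by unfold Spec_find_link; infer_instance

-- ===== CLAIM (what is proved, stated in full; the proofs are below) =====
def Claim_equal_find_link : Prop := ∀ (ticket_data : List (String × List (String × String))) (base_url : String), Dom_find_link ticket_data base_url → Spec_find_link ticket_data base_url (find_link ticket_data base_url)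

-- ===== LEMMAS AND PROOFS =====

-- the stopping condition of B's scan, in Prop form
def Pcond (s : List Char) (limit j : Nat) : Prop :=
  [' '] <+: s.drop j ∨
    (limit ≤ j ∧ ("https://".toList <+: s.drop j ∨ "http://".toList <+: s.drop j))

lemma single_prefix_iff (s : List Char) (c : Char) (j : Nat) (h : j < s.length) :
    [c] <+: s.drop j ↔ s[j] = c := by
  rw [List.drop_eq_getElem_cons h, List.cons_prefix_cons]
  simp [eq_comm]

lemma Pcond_lt (s : List Char) (limit m : Nat) (hP : Pcond s limit m) : m < s.length := by
  by_contra hge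
  have hnil : s.drop m = [] := List.drop_eq_nil_of_le (by omega)
  rcases hP with h | ⟨_, h | h⟩ <;>
    · rw [hnil] at h
      exact absurd (List.prefix_nil.mp h) (by decide)

lemma scanEnd_eq (s : List Char) (limit m : Nat) (hm : m ≤ s.length)
    (hP : m = s.length ∨ Pcond s limit m) :
    ∀ i, i ≤ m → (∀ j, i ≤ j → j < m → ¬ Pcond s limit j) → scanEnd s limit i = m := by
  have base : scanEnd s limit m = m := by
    rcases hP with rfl | hPm
    · rw [scanEnd]; simp
    · have hlt := Pcond_lt s limit m hPm
      rw [scanEnd, dif_pos hlt]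
      by_cases hsp : s[m] = ' '
      · simp [hsp]
      · rw [if_neg hsp, if_pos]
        rcases hPm with h | ⟨hl, h | h⟩
        · exact absurd ((single_prefix_iff s ' ' m hlt).mp h) hsp
        · exact ⟨hl, by
            simp only [Bool.or_eq_true]
            exact Or.inl ((PySem.Chars.startswith_iff _ _).mpr h)⟩
        · exact ⟨hl, by
            simp only [Bool.or_eq_true]
            exact Or.inr ((PySem.Chars.startswith_iff _ _).mpr h)⟩
  have main : ∀ k i, m - i = k → i ≤ m → (∀ j, i ≤ j → j < m → ¬ Pcond s limit j) →
      scanEnd s limit i = m := by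
    intro k
    induction k with
    | zero =>
      intro i hk hi _
      have : i = m := by omega
      subst this; exact base
    | succ k ih =>
      intro i hk hi hnone
      have hilt : i < m := by omega
      have hiln : i < s.length := by omega
      have hnPi : ¬ Pcond s limit i := hnone i le_rfl hilt
      rw [scanEnd, dif_pos hiln]
      have hsp : ¬ s[i] = ' ' := fun h =>
        hnPi (Or.inl ((single_prefix_iff s ' ' i hiln).mpr h))
      rw [if_neg hsp, if_neg]
      · exact ih (i + 1) (by omega) (by omega) (fun j hj hj' => hnone j (by omega) hj')
      · rintro ⟨hl, hb⟩
        rcases Bool.or_eq_true_iff.mp hb with h | h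
        · exact hnPi (Or.inr ⟨hl, Or.inl ((PySem.Chars.startswith_iff _ _).mp h)⟩)
        · exact hnPi (Or.inr ⟨hl, Or.inr ((PySem.Chars.startswith_iff _ _).mp h)⟩)
  intro i hi hnone
  exact main (m - i) i rfl hi hnone

-- a prefix occurrence at j ≥ k forces findFrom (from k) to hit at or before j
lemma findFrom_hits {s sub : List Char} {k j : Nat} (hk : k ≤ s.length)
    (hj : k ≤ j) (hpre : sub <+: s.drop j) :
    PySem.Chars.findFrom s sub (k : Int) ≠ -1 ∧
      (PySem.Chars.findFrom s sub (k : Int)).toNat ≤ j := by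
  have hne : PySem.Chars.findFrom s sub (k : Int) ≠ -1 := by
    intro heq
    apply (PySem.Chars.findFrom_natCast_eq_neg_one_iff s sub k hk).mp heq
    rw [← PySem.Chars.isIn_iff_infix, ← PySem.Chars.exists_prefix_drop_iff_isIn]
    exact ⟨j - k, by rwa [List.drop_drop, Nat.add_sub_cancel' hj]⟩
  refine ⟨hne, ?_⟩
  by_contra hgt
  exact (PySem.Chars.findFrom_natCast_spec s sub k hk hne).2.2 j hj (by omega) hpre

-- the core equation: A's min-of-finds end equals B's scan end
lemma end_eq (s bl : List Char) (h : bl <:+: s) :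
    PySem.List.min?
      (([PySem.Chars.findFrom s [' '] (PySem.Chars.find s bl),
         PySem.Chars.findFrom s "https://".toList (PySem.Chars.find s bl + bl.length),
         PySem.Chars.findFrom s "http://".toList (PySem.Chars.find s bl + bl.length),
         ((s.length : Int))]).filter (fun i => i ≠ -1)) (fun x => x)
      = some ((scanEnd s ((PySem.Chars.find s bl).toNat + bl.length)
               (PySem.Chars.find s bl).toNat : Nat) : Int) := by
  have hf0 : 0 ≤ PySem.Chars.find s bl := (PySem.Chars.find_nonneg_iff s bl).mpr h
  set f := PySem.Chars.find s bl with hfdef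
  set st := f.toNat with hstdef
  have hfcast : f = (st : Int) := (Int.toNat_of_nonneg hf0).symm
  set n := s.length with hndef
  have hstn : st ≤ n := by
    have := PySem.Chars.find_le_length s bl
    omega
  have hpre : bl <+: s.drop st := (PySem.Chars.find_spec hf0).1
  have hlim : st + bl.length ≤ n := by
    have h1 := hpre.length_le
    rw [List.length_drop] at h1
    omega
  set limit := st + bl.length with hlimdef
  have hoff : f + (bl.length : Int) = (limit : Int) := by rw [hfcast, hlimdef]; push_cast; ring
  set a := PySem.Chars.findFrom s [' '] f with hadef
  set b := PySem.Chars.findFrom s "https://".toList (f + bl.length) with hbdef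
  set c := PySem.Chars.findFrom s "http://".toList (f + bl.length) with hcdef
  have hacast : a = PySem.Chars.findFrom s [' '] (st : Int) := by rw [hadef, hfcast]
  have hbcast : b = PySem.Chars.findFrom s "https://".toList (limit : Int) := by
    rw [hbdef, hoff]
  have hccast : c = PySem.Chars.findFrom s "http://".toList (limit : Int) := by
    rw [hcdef, hoff]
  set F := ([a, b, c, ((n : Int))]).filter (fun i => i ≠ -1) with hFdef
  have hnmem : ((n : Int)) ∈ F := by
    rw [hFdef]
    exact List.mem_filter.mpr ⟨by simp, by simp⟩
  obtain ⟨m, hmin⟩ : ∃ m, PySem.List.min? F (fun x => x) = some m := by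
    cases hm : PySem.List.min? F (fun x => x) with
    | none =>
      rw [PySem.List.min?_eq_none_iff] at hm
      rw [hm] at hnmem; cases hnmem
    | some m => exact ⟨m, rfl⟩
  have hmmem := PySem.List.min?_mem hmin
  have hmle : ∀ y ∈ F, m ≤ y := PySem.List.min?_id_le hmin
  have hmlen : m ≤ (n : Int) := hmle _ hnmem
  rw [hFdef, List.mem_filter] at hmmem
  obtain ⟨hmcand, hmne⟩ := hmmem
  have hmne : m ≠ -1 := by simpa using hmne
  simp only [List.mem_cons, List.not_mem_nil, or_false] at hmcand
  -- facts about each candidate when it is not -1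
  have hspec : ∀ (sub : List Char) (k : Nat), k ≤ n →
      PySem.Chars.findFrom s sub (k : Int) ≠ -1 →
      (k : Int) ≤ PySem.Chars.findFrom s sub (k : Int) ∧
        sub <+: s.drop (PySem.Chars.findFrom s sub (k : Int)).toNat :=
    fun sub k hk hne =>
      ⟨(PySem.Chars.findFrom_natCast_spec s sub k hk hne).1,
       (PySem.Chars.findFrom_natCast_spec s sub k hk hne).2.1⟩
  -- m is nonnegative and ≥ st
  have hm0 : (st : Int) ≤ m := by
    rcases hmcand with rfl | rfl | rfl | rfl
    · exact hacast ▸ (hspec [' '] st hstn (hacast ▸ hmne)).1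
    · have hb := (hspec "https://".toList limit hlim (hbcast ▸ hmne)).1
      rw [← hbcast] at hb
      omega
    · have hc := (hspec "http://".toList limit hlim (hccast ▸ hmne)).1
      rw [← hccast] at hc
      omega
    · exact_mod_cast Int.ofNat_le.mpr hstn
  have hmnonneg : 0 ≤ m := le_trans (by exact_mod_cast Nat.zero_le st) hm0
  have hmcastback : m = (m.toNat : Int) := (Int.toNat_of_nonneg hmnonneg).symm
  -- no stop condition strictly before m
  have hnone : ∀ j, st ≤ j → j < m.toNat → ¬ Pcond s limit j := by
    intro j hj hjm hP
    rcases hP with hsp | ⟨hl, hh | hh⟩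
    · obtain ⟨hne, hle⟩ := findFrom_hits (sub := [' ']) hstn hj hsp
      have := hmle a (List.mem_filter.mpr ⟨by simp, by simpa using (hacast ▸ hne)⟩)
      rw [hacast] at this
      omega
    · obtain ⟨hne, hle⟩ := findFrom_hits (sub := "https://".toList) hlim hl hh
      have := hmle b (List.mem_filter.mpr ⟨by simp, by simpa using (hbcast ▸ hne)⟩)
      rw [hbcast] at this
      omega
    · obtain ⟨hne, hle⟩ := findFrom_hits (sub := "http://".toList) hlim hl hh
      have := hmle c (List.mem_filter.mpr ⟨by simp, by simpa using (hccast ▸ hne)⟩)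
      rw [hccast] at this
      omega
  -- m itself is the length or a stop position
  have hstop : m.toNat = n ∨ Pcond s limit m.toNat := by
    rcases hmcand with rfl | rfl | rfl | rfl
    · exact Or.inr (Or.inl (hacast ▸ (hspec [' '] st hstn (hacast ▸ hmne)).2))
    · refine Or.inr (Or.inr ⟨?_, Or.inl (hbcast ▸ (hspec "https://".toList limit hlim (hbcast ▸ hmne)).2)⟩)
      have := (hspec "https://".toList limit hlim (hbcast ▸ hmne)).1
      rw [← hbcast] at this
      omega
    · refine Or.inr (Or.inr ⟨?_, Or.inr (hccast ▸ (hspec "http://".toList limit hlim (hccast ▸ hmne)).2)⟩)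
      have := (hspec "http://".toList limit hlim (hccast ▸ hmne)).1
      rw [← hccast] at this
      omega
    · left; omega
  have hscan : scanEnd s limit st = m.toNat :=
    scanEnd_eq s limit m.toNat (by omega) hstop st (by omega) hnone
  rw [hmin, hscan, ← hmcastback]

-- the base_url-found branch: A's match-on-min equals B's slice-to-scanEnd
lemma branch_eq (d base_url : String) (hin : base_url.toList <:+: d.toList) :
    (match PySem.List.min?
        (([PySem.Str.findFrom d " " (PySem.Str.find d base_url),
           PySem.Str.findFrom d "https://" (PySem.Str.find d base_url + PySem.Str.len base_url),
           PySem.Str.findFrom d "http://" (PySem.Str.find d base_url + PySem.Str.len base_url),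
           PySem.Str.len d]).filter (fun i => i ≠ -1)) (fun x => x) with
     | some end_index => some (PySem.Str.slice d (some (PySem.Str.find d base_url)) (some end_index))
     | none => none)
    = some (PySem.Str.slice d (some ((PySem.Str.find d base_url).toNat : Int))
        (some ((scanEnd d.toList ((PySem.Str.find d base_url).toNat + base_url.toList.length)
                 (PySem.Str.find d base_url).toNat : Nat) : Int))) := by
  have hf0 : 0 ≤ PySem.Str.find d base_url := by
    rw [PySem.Str.find_eq, PySem.Chars.find_nonneg_iff]; exact hin
  have hsp : (" " : String).toList = [' '] := by decide
  have key := end_eq d.toList base_url.toList hin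
  simp only [PySem.Str.findFrom_eq, PySem.Str.find_eq, PySem.Str.len_eq, hsp] at *
  rw [key]
  rw [Int.toNat_of_nonneg hf0]

-- ===== VERDICT (by name: the statement is the Claim_ definition above) =====
theorem find_link_spec : Claim_equal_find_link := by
  intro ticket_data base_url _
  unfold Spec_find_link find_link find_link_alt
  by_cases htd : ticket_data = []
  · simp [htd]
  · rw [if_neg htd, if_neg htd]
    dsimp only
    by_cases hin : base_url.toList <:+:
        ((PySem.Dict.mk ((PySem.Dict.mk ticket_data).getD "fields" [])).getD "description" "").toList
    · have hisin : PySem.Str.isIn base_url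
          ((PySem.Dict.mk ((PySem.Dict.mk ticket_data).getD "fields" [])).getD "description" "") = true := by
        rw [PySem.Str.isIn_eq, PySem.Chars.isIn_iff_infix]; exact hin
      have hfne : PySem.Str.find
          ((PySem.Dict.mk ((PySem.Dict.mk ticket_data).getD "fields" [])).getD "description" "") base_url ≠ -1 := by
        rw [Ne, PySem.Str.find_eq, PySem.Chars.find_eq_neg_one_iff]
        exact fun hc => hc hin
      rw [if_pos hisin, if_neg hfne]
      exact branch_eq _ _ hin
    · have hisin : PySem.Str.isIn base_url
          ((PySem.Dict.mk ((PySem.Dict.mk ticket_data).getD "fields" [])).getD "description" "") = false := by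
        rw [PySem.Str.isIn_eq]
        exact Bool.eq_false_iff.mpr (fun hc => hin ((PySem.Chars.isIn_iff_infix _ _).mp hc))
      have hf : PySem.Str.find
          ((PySem.Dict.mk ((PySem.Dict.mk ticket_data).getD "fields" [])).getD "description" "") base_url = -1 := by
        rw [PySem.Str.find_eq, PySem.Chars.find_eq_neg_one_iff]; exact hin
      rw [hisin, if_pos hf]
      simp
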